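-- pv_equiv track=rewrite | github.com/RaviShekhar13/learningpython | week-08/Mom_6.py | MoM7Pos
-- ===== SOURCE A (Python) =====
-- def MoM7Pos(arr):
--     """
--     Computes the median of medians (using blocks of 7) and returns its position
--     in the original array as if it were sorted. Returns the first occurrence if duplicates exist.
--     """
--     if not arr:
--         return -1
--
--     # Make a copy to avoid modifying original array
--     arr_copy = arr.copy()
--     n = len(arr_copy)
--
--     def select(arr, left, right, k):
--         """Select k-th smallest element in arr[left..right]"""
--         while True:
--             if left == right:
--                 return left
--
--             # Choose pivot using median of medians
--             pivot_index = pivot(arr, left, right)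
--             pivot_index = partition(arr, left, right, pivot_index)
--
--             if k == pivot_index:
--                 return k
--             elif k < pivot_index:
--                 right = pivot_index - 1
--             else:
--                 left = pivot_index + 1
--
--     def pivot(arr, left, right):
--         """Select pivot using median of medians"""
--         # For 5 or fewer elements, get median directly
--         if right - left < 5:
--             return median5(arr, left, right)
--
--         # Otherwise move medians to front
--         for i in range(left, right + 1, 5):
--             sub_right = min(i + 4, right)
--             median5_index = median5(arr, i, sub_right)
--
--             # Swap median to front
--             swap_pos = left + (i - left) // 5
--             arr[median5_index], arr[swap_pos] = arr[swap_pos], arr[median5_index]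
--
--         # Compute median of medians
--         median_count = (right - left) // 5 + 1
--         return select(arr, left, left + median_count - 1, left + median_count // 2)
--
--     def median5(arr, left, right):
--         """Get median of <=5 elements using insertion sort"""
--         sub = arr[left:right+1]
--         sub.sort()
--         median_val = sub[len(sub)//2]
--         # Find first occurrence of median in original subarray
--         for i in range(left, right + 1):
--             if arr[i] == median_val:
--                 return i
--         return left
--
--     def partition(arr, left, right, pivot_index):
--         """Partition around pivot"""
--         pivot_val = arr[pivot_index]
--         arr[pivot_index], arr[right] = arr[right], arr[pivot_index]
--
--         store_index = left
--         for i in range(left, right):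
--             if arr[i] < pivot_val:
--                 arr[store_index], arr[i] = arr[i], arr[store_index]
--                 store_index += 1
--
--         # Move pivot to final position
--         arr[right], arr[store_index] = arr[store_index], arr[right]
--         return store_index
--
--     # Find the median index in the copy
--     median_pos_in_copy = select(arr_copy, 0, n - 1, n // 2)
--     median_val = arr_copy[median_pos_in_copy]
--
--     # Now find first occurrence of this value in original array
--     # that would appear at median position in sorted array
--     less_count = sum(1 for x in arr if x < median_val)
--     equal_count = 0
--
--     for i, x in enumerate(arr):
--         if x == median_val:
--             if equal_count == 0 and less_count == 0:
--                 return i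
--             if x < median_val:
--                 less_count -= 1
--             elif x == median_val:
--                 equal_count += 1
--
--     # Fallback: find first occurrence in original array
--     for i, x in enumerate(arr):
--         if x == median_val:
--             return i
--
--     return -1
-- ===== SOURCE B (Python) =====
-- def MoM7Pos(arr):
--     """Index of the first occurrence of the median value (sorted position len//2)."""
--     if not arr:
--         return -1
--     return arr.index(sorted(arr)[len(arr) // 2])
-- ===== Notes on version B (the rewrite author's own statement) =====
-- stated objective: simpler
-- what changed: Replaces the whole in-place median-of-medians selection (select/pivot/partition/median5) plus counting rescans with a single sort and one index lookup: B computes sorted(arr)[len(arr)//2] and returns arr.index of that value.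
import Mathlib
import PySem

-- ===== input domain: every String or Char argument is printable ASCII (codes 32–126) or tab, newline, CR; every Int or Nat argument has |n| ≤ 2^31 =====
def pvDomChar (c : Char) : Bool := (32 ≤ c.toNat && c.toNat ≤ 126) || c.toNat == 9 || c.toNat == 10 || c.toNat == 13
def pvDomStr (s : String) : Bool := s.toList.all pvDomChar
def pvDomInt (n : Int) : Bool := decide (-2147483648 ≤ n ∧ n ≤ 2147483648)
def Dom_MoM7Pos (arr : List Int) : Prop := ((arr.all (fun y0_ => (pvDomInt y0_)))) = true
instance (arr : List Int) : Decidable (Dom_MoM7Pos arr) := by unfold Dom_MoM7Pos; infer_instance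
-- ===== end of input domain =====

-- B replaces A's in-place median-of-medians selection with one sort plus an index lookup (objective: simpler).

-- ===== PORT A =====
-- arr[i] for an index we keep as Nat (all reads are proved in range; 0 is a dead default)
def pget (a : List Int) (i : Nat) : Int := a.getD i 0
-- 'arr[i], arr[j] = arr[j], arr[i]'
def pswap (a : List Int) (i j : Nat) : List Int := (a.set i (pget a j)).set j (pget a i)

-- the 'for i in range(left, right+1): if arr[i] == median_val: return i' scan of median5 (c = number of remaining indices)
def scanEq (a : List Int) (mv : Int) : Nat → Nat → Option Nat
  | _, 0 => none
  | i, c+1 => if pget a i = mv then some i else scanEq a mv (i+1) c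

-- 'return left' fallback of median5's final scan
def scanOr (a : List Int) (mv : Int) (l c : Nat) : Nat :=
  match scanEq a mv l c with
  | some i => i
  | none => l

-- median5: sub = arr[left:right+1]; sub.sort(); mv = sub[len(sub)//2]; first index of mv in arr[left..right], else left
-- (the slice arr[left:right+1] is exact as drop/take here: 0 ≤ left ≤ right+1)
def med5 (a : List Int) (l r : Nat) : Nat :=
  let sub := (a.drop l).take (r + 1 - l)
  let subS := PySem.List.sorted sub (fun x => x) false
  let mv := subS.getD (subS.length / 2) 0
  scanOr a mv l (r + 1 - l)

-- partition's 'for i in range(left, right)' loop carrying store_index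
def partLoop (pv : Int) (a : List Int) (store i r : Nat) : Nat × List Int :=
  if h : i < r then
    if pget a i < pv then partLoop pv (pswap a store i) (store+1) (i+1) r
    else partLoop pv a store (i+1) r
  else (store, a)
termination_by r - i

def partitionA (a : List Int) (l r pi : Nat) : Nat × List Int :=
  let pv := pget a pi
  let a1 := pswap a pi r
  let sa := partLoop pv a1 l l r
  (sa.1, pswap sa.2 r sa.1)

-- one iteration of pivot's 'for i in range(left, right+1, 5)' median-moving loop
def sweepStep (l r : Nat) (a : List Int) (i : Nat) : List Int :=
  let sr := min (i+4) r
  let m := med5 a i sr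
  pswap a m (l + (i - l) / 5)

-- select/pivot: mutual recursion; the fuel argument only makes the Python 'while True'/mutual
-- recursion total (none = fuel exhausted; proved unreachable for the fuel MoM7Pos passes)
mutual
def selectF : Nat → List Int → Nat → Nat → Nat → Option (Nat × List Int)
  | 0, _, _, _, _ => none
  | f+1, a, l, r, k =>
    if l = r then some (l, a)
    else match pivotF f a l r with
      | none => none
      | some pa =>
        let pr := partitionA pa.2 l r pa.1
        if k = pr.1 then some (k, pr.2)
        else if k < pr.1 then selectF f pr.2 l (pr.1 - 1) k
        else selectF f pr.2 (pr.1 + 1) r k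
def pivotF : Nat → List Int → Nat → Nat → Option (Nat × List Int)
  | 0, _, _, _ => none
  | f+1, a, l, r =>
    if r - l < 5 then some (med5 a l r, a)
    else
      let a' := (List.range' l ((r - l) / 5 + 1) 5).foldl (sweepStep l r) a
      let mc := (r - l) / 5 + 1
      selectF f a' l (l + mc - 1) (l + mc / 2)
end

-- the 'for i, x in enumerate(arr)' loop with less_count/equal_count
def loop1 : List Int → Int → Int → Int → Nat → Option Nat
  | [], _, _, _, _ => none
  | x :: xs, mv, less, eq, i =>
    if x = mv then
      if eq = 0 ∧ less = 0 then some i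
      else loop1 xs mv (if x < mv then less - 1 else less)
                       (if x < mv then eq else if x = mv then eq + 1 else eq) (i+1)
    else loop1 xs mv less eq (i+1)

-- the fallback 'for i, x in enumerate(arr): if x == median_val: return i'
def loop2 : List Int → Int → Nat → Option Nat
  | [], _, _ => none
  | x :: xs, mv, i => if x = mv then some i else loop2 xs mv (i+1)

def MoM7Pos (arr : List Int) : Int :=
  if arr = [] then -1
  else
    let n := arr.length
    match selectF (2*n+2) arr 0 (n-1) (n/2) with
    | none => -1   -- fuel guard only; proved unreachable (selectF_pivotF_ok)
    | some pa =>
      let mv := pget pa.2 pa.1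
      let less : Int := ((arr.filter (fun x => x < mv)).length : Int)
      match loop1 arr mv less 0 0 with
      | some i => (i : Int)
      | none =>
        match loop2 arr mv 0 with
        | some i => (i : Int)
        | none => -1

-- ===== PORT B =====
def MoM7Pos_alt (arr : List Int) : Int :=
  if arr = [] then -1
  else
    let t := (PySem.List.sorted arr (fun x => x) false).getD (arr.length / 2) 0
    match PySem.List.index? arr t with
    | some i => (i : Int)
    | none => -1   -- unreachable: t is an element of arr (arr.index never raises here)

-- ===== PRECONDITION & SPEC =====
def Spec_MoM7Pos (arr : List Int) (out : Int) : Prop := out = MoM7Pos_alt arr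
instance (arr : List Int) (out : Int) : Decidable (Spec_MoM7Pos arr out) := by unfold Spec_MoM7Pos; infer_instance

-- ===== CLAIM (what is proved, stated in full; the proofs are below) =====
def Claim_equal_MoM7Pos : Prop := ∀ (arr : List Int), Dom_MoM7Pos arr → Spec_MoM7Pos arr (MoM7Pos arr)

-- ===== LEMMAS AND PROOFS =====

-- abbreviations used only by the proofs
def sortI (xs : List Int) : List Int := PySem.List.sorted xs (fun x => x) false
-- the segment arr[l .. l+len-1] read through pget
def pseg (a : List Int) (l len : Nat) : List Int := (List.range' l len).map (pget a)
-- b is a with only positions l..r disturbed, by a permutation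
def Untouched (a b : List Int) (l r : Nat) : Prop :=
  b.length = a.length ∧ (∀ i, i < l ∨ r < i → pget b i = pget a i) ∧ b.Perm a

lemma pget_set (a : List Int) (i : Nat) (v : Int) (j : Nat) :
    pget (a.set i v) j = if i = j ∧ i < a.length then v else pget a j := by
  simp [pget, List.getD, List.getElem?_set]; split_ifs <;> simp_all <;> omega

@[simp] lemma length_pswap (a : List Int) (i j : Nat) : (pswap a i j).length = a.length := by
  simp [pswap]

lemma pget_pswap (a : List Int) (i j x : Nat) (hi : i < a.length) (hj : j < a.length) :
    pget (pswap a i j) x = if x = j then pget a i else if x = i then pget a j else pget a x := by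
  rw [pswap, pget_set, pget_set]
  simp only [List.length_set]
  split_ifs <;> first | rfl | omega

lemma cons_set_perm (t : List Int) (j : Nat) (h : j < t.length) (v : Int) :
    (pget t j :: t.set j v).Perm (v :: t) := by
  induction t generalizing j with
  | nil => simp at h
  | cons x t ih =>
    cases j with
    | zero => simpa [pget] using List.Perm.swap v x t
    | succ j =>
      have hj : j < t.length := by simpa using h
      have h1 : pget (x :: t) (j+1) = pget t j := by simp [pget]
      have h2 : (x :: t).set (j+1) v = x :: t.set j v := by simp
      rw [h1, h2]
      have s1 : (pget t j :: x :: t.set j v).Perm (x :: pget t j :: t.set j v) :=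
        List.Perm.swap x (pget t j) _
      have s2 : (x :: pget t j :: t.set j v).Perm (x :: v :: t) := (ih j hj).cons x
      have s3 : (x :: v :: t).Perm (v :: x :: t) := List.Perm.swap v x t
      exact (s1.trans s2).trans s3

lemma pswap_perm (a : List Int) (i j : Nat) (hi : i < a.length) (hj : j < a.length) :
    (pswap a i j).Perm a := by
  induction a generalizing i j with
  | nil => simp at hi
  | cons x t ih =>
    cases i with
    | zero =>
      cases j with
      | zero => simp [pswap, pget]
      | succ j =>
        have hj' : j < t.length := by simpa using hj
        have e1 : (x :: t).set 0 (pget (x :: t) (j+1)) = pget t j :: t := by simp [pget]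
        have e2 : (pget t j :: t).set (j+1) (pget (x :: t) 0) = pget t j :: t.set j x := by
          simp [pget]
        rw [pswap, e1, e2]
        exact cons_set_perm t j hj' x
    | succ i =>
      have hi' : i < t.length := by simpa using hi
      cases j with
      | zero =>
        have e1 : (x :: t).set (i+1) (pget (x :: t) 0) = x :: t.set i x := by simp [pget]
        have e2 : (x :: t.set i x).set 0 (pget (x :: t) (i+1)) = pget t i :: t.set i x := by
          simp [pget]
        rw [pswap, e1, e2]
        exact cons_set_perm t i hi' x
      | succ j =>
        have hj' : j < t.length := by simpa using hj
        have e : pswap (x :: t) (i+1) (j+1) = x :: pswap t i j := by simp [pswap, pget]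
        rw [e]
        exact (ih i j hi' hj').cons x

lemma pseg_append (a : List Int) (l m n : Nat) :
    pseg a l (m+n) = pseg a l m ++ pseg a (l+m) n := by
  have h := List.range'_append (s := l) (m := m) (n := n) (step := 1)
  rw [one_mul] at h
  rw [pseg, pseg, pseg, ← h, List.map_append]

lemma pseg_one (a : List Int) (l : Nat) : pseg a l 1 = [pget a l] := by simp [pseg]

lemma length_pseg (a : List Int) (l len : Nat) : (pseg a l len).length = len := by simp [pseg]

lemma pseg_full (a : List Int) : pseg a 0 a.length = a := by
  apply List.ext_getElem (by simp [pseg])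
  intro i h1 h2
  simp [pseg, pget, List.getD, List.getElem?_eq_getElem h2]

lemma pseg_congr (a b : List Int) (l len : Nat)
    (h : ∀ i, l ≤ i → i < l + len → pget a i = pget b i) : pseg a l len = pseg b l len := by
  apply List.map_congr_left
  intro i hi
  have := List.mem_range'_1.mp hi
  exact h i this.1 this.2

lemma untouched_refl (a : List Int) (l r : Nat) : Untouched a a l r :=
  ⟨rfl, fun _ _ => rfl, List.Perm.refl a⟩

lemma untouched_trans {a b c : List Int} {l r : Nat} (h1 : Untouched a b l r)
    (h2 : Untouched b c l r) : Untouched a c l r :=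
  ⟨h2.1.trans h1.1, fun i hi => (h2.2.1 i hi).trans (h1.2.1 i hi), h2.2.2.trans h1.2.2⟩

lemma untouched_mono {a b : List Int} {l r l' r' : Nat} (hl : l ≤ l') (hr : r' ≤ r)
    (h : Untouched a b l' r') : Untouched a b l r :=
  ⟨h.1, fun i hi => h.2.1 i (by omega), h.2.2⟩

lemma untouched_pswap (a : List Int) (i j l r : Nat) (hi : l ≤ i) (hi2 : i ≤ r)
    (hj : l ≤ j) (hj2 : j ≤ r) (hil : i < a.length) (hjl : j < a.length) :
    Untouched a (pswap a i j) l r := by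
  refine ⟨by simp, fun x hx => ?_, pswap_perm a i j hil hjl⟩
  rw [pget_pswap a i j x hil hjl]
  split_ifs <;> first | omega | rfl

lemma mem_pseg {x : Int} {a : List Int} {l len : Nat} :
    x ∈ pseg a l len ↔ ∃ i, l ≤ i ∧ i < l + len ∧ x = pget a i := by
  simp only [pseg, List.mem_map, List.mem_range'_1]
  constructor
  · rintro ⟨i, ⟨h1, h2⟩, h3⟩; exact ⟨i, h1, h2, h3.symm⟩
  · rintro ⟨i, h1, h2, h3⟩; exact ⟨i, ⟨h1, h2⟩, h3.symm⟩

lemma pseg_perm_of_untouched {a b : List Int} {l r : Nat} (h : Untouched a b l r)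
    (hr : r < a.length) (hlr : l ≤ r) : (pseg b l (r+1-l)).Perm (pseg a l (r+1-l)) := by
  obtain ⟨hlen, hout, hperm⟩ := h
  generalize hm3 : a.length - (r+1) = m3 at *
  have e : a.length = l + ((r+1-l) + m3) := by omega
  have ha : a = pseg a 0 l ++ (pseg a l (r+1-l) ++ pseg a (l+(r+1-l)) m3) := by
    conv_lhs => rw [← pseg_full a]
    rw [e, pseg_append, pseg_append, Nat.zero_add]
  have hb : b = pseg b 0 l ++ (pseg b l (r+1-l) ++ pseg b (l+(r+1-l)) m3) := by
    conv_lhs => rw [← pseg_full b]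
    rw [hlen, e, pseg_append, pseg_append, Nat.zero_add]
  have hX : pseg b 0 l = pseg a 0 l :=
    pseg_congr b a 0 l (fun i _ h2 => hout i (Or.inl (by omega)))
  have hY : pseg b (l+(r+1-l)) m3 = pseg a (l+(r+1-l)) m3 :=
    pseg_congr b a _ _ (fun i h1 _ => hout i (Or.inr (by omega)))
  have hp : (pseg b 0 l ++ (pseg b l (r+1-l) ++ pseg b (l+(r+1-l)) m3)).Perm
      (pseg a 0 l ++ (pseg a l (r+1-l) ++ pseg a (l+(r+1-l)) m3)) := by
    rw [← ha, ← hb]; exact hperm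
  rw [hX, hY] at hp
  have hp2 := (List.perm_append_left_iff _).mp hp
  exact (List.perm_append_right_iff _).mp hp2

lemma sortI_perm (xs : List Int) : (sortI xs).Perm xs := PySem.List.sorted_perm xs _ false

lemma sortI_congr_perm {xs ys : List Int} (h : xs.Perm ys) : sortI xs = sortI ys :=
  PySem.List.sorted_eq_sorted_of_perm xs ys _ (fun _ _ hh => hh) h

lemma sortI_singleton (x : Int) : sortI [x] = [x] :=
  PySem.List.sorted_eq_self_of_pairwise [x] _ (List.pairwise_singleton _ x)

lemma sortI_split (L U : List Int) (pv : Int) (hL : ∀ x ∈ L, x < pv) (hU : ∀ x ∈ U, pv ≤ x) :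
    sortI (L ++ pv :: U) = sortI L ++ pv :: sortI U := by
  apply PySem.List.sorted_id_eq_of_perm_of_pairwise
  · exact (sortI_perm L).append ((sortI_perm U).cons pv)
  · rw [List.pairwise_append]
    refine ⟨PySem.List.sorted_pairwise L _, ?_, ?_⟩
    · rw [List.pairwise_cons]
      refine ⟨fun y hy => hU y ((PySem.List.mem_sorted U _ false y).mp hy), ?_⟩
      exact PySem.List.sorted_pairwise U _
    · intro x hx y hy
      have hxL : x < pv := hL x ((PySem.List.mem_sorted L _ false x).mp hx)
      rcases List.mem_cons.mp hy with h | h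
      · omega
      · have := hU y ((PySem.List.mem_sorted U _ false y).mp h)
        omega

lemma length_sortI (xs : List Int) : (sortI xs).length = xs.length :=
  (sortI_perm xs).length_eq

lemma scanEq_range (a : List Int) (mv : Int) :
    ∀ c i j, scanEq a mv i c = some j → i ≤ j ∧ j < i + c := by
  intro c
  induction c with
  | zero => intro i j h; simp [scanEq] at h
  | succ c ih =>
    intro i j h
    rw [scanEq] at h
    split at h
    · cases h; omega
    · have := ih (i+1) j h; omega

lemma scanOr_range (a : List Int) (mv : Int) (l c : Nat) (hc : 0 < c) :
    l ≤ scanOr a mv l c ∧ scanOr a mv l c < l + c := by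
  unfold scanOr
  cases hs : scanEq a mv l c with
  | none => simp; omega
  | some i => have := scanEq_range a mv c l i hs; simpa using this

lemma med5_range (a : List Int) (l r : Nat) (h : l ≤ r) :
    l ≤ med5 a l r ∧ med5 a l r ≤ r := by
  have key : ∀ mv : Int, l ≤ scanOr a mv l (r+1-l) ∧ scanOr a mv l (r+1-l) ≤ r := by
    intro mv
    have := scanOr_range a mv l (r+1-l) (by omega)
    omega
  simp only [med5]
  exact key _

lemma partLoop_spec (pv : Int) :
    ∀ (c : Nat) (a : List Int) (store i l r : Nat), i ≤ r → r - i = c → store ≤ i → l ≤ store →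
    r < a.length → pget a r = pv →
    (∀ x, l ≤ x → x < store → pget a x < pv) →
    (∀ x, store ≤ x → x < i → pv ≤ pget a x) →
    store ≤ (partLoop pv a store i r).1 ∧ (partLoop pv a store i r).1 ≤ r ∧
    Untouched a (partLoop pv a store i r).2 l r ∧
    pget (partLoop pv a store i r).2 r = pv ∧
    (∀ x, l ≤ x → x < (partLoop pv a store i r).1 → pget (partLoop pv a store i r).2 x < pv) ∧
    (∀ x, (partLoop pv a store i r).1 ≤ x → x < r → pv ≤ pget (partLoop pv a store i r).2 x) := by
  intro c
  induction c with
  | zero =>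
    intro a store i l r hir hc hsi hls hr hpr hreg1 hreg2
    have hie : i = r := by omega
    rw [partLoop, dif_neg (by omega)]
    exact ⟨le_refl _, by omega, untouched_refl a l r, hpr, hreg1, by
      intro x h1 h2; exact hreg2 x h1 (by omega)⟩
  | succ c ih =>
    intro a store i l r hir hc hsi hls hr hpr hreg1 hreg2
    have hilt : i < r := by omega
    have hil : i < a.length := by omega
    have hsl : store < a.length := by omega
    rw [partLoop, dif_pos hilt]
    by_cases hcmp : pget a i < pv
    · rw [if_pos hcmp]
      have hg := fun x => pget_pswap a store i x hsl hil
      have h1 := ih (pswap a store i) (store+1) (i+1) l r (by omega) (by omega) (by omega)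
        (by omega) (by simpa using hr) (by rw [hg r]; rw [if_neg (by omega), if_neg (by omega)]; exact hpr)
        (by
          intro x hx1 hx2
          rw [hg x]
          by_cases hxi : x = i
          · rw [if_pos hxi]
            have hsi' : store = i := by omega
            rw [hsi']; exact hcmp
          · rw [if_neg hxi]
            by_cases hxs : x = store
            · rw [if_pos hxs]; exact hcmp
            · rw [if_neg hxs]; exact hreg1 x hx1 (by omega))
        (by
          intro x hx1 hx2
          rw [hg x]
          by_cases hxi : x = i
          · rw [if_pos hxi]; exact hreg2 store (le_refl _) (by omega)
          · rw [if_neg hxi, if_neg (by omega)]; exact hreg2 x (by omega) (by omega))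
      refine ⟨Nat.le_trans (Nat.le_succ store) h1.1, h1.2.1, ?_, h1.2.2.2.1,
        h1.2.2.2.2.1, h1.2.2.2.2.2⟩
      exact untouched_trans (untouched_pswap a store i l r (by omega) (by omega) (by omega)
        (by omega) hsl hil) h1.2.2.1
    · rw [if_neg hcmp]
      exact ih a store (i+1) l r (by omega) (by omega) (by omega) hls hr hpr hreg1
        (by
          intro x hx1 hx2
          by_cases hxi : x = i
          · subst hxi; omega
          · exact hreg2 x hx1 (by omega))
lemma partitionA_spec (a : List Int) (l r pi : Nat) (h1 : l ≤ pi) (h2 : pi ≤ r)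
    (hr : r < a.length) :
    l ≤ (partitionA a l r pi).1 ∧ (partitionA a l r pi).1 ≤ r ∧
    Untouched a (partitionA a l r pi).2 l r ∧
    pget (partitionA a l r pi).2 (partitionA a l r pi).1 = pget a pi ∧
    (∀ x, l ≤ x → x < (partitionA a l r pi).1 → pget (partitionA a l r pi).2 x < pget a pi) ∧
    (∀ x, (partitionA a l r pi).1 < x → x ≤ r → pget a pi ≤ pget (partitionA a l r pi).2 x) := by
  have hpil : pi < a.length := by omega
  simp only [partitionA]
  set pv := pget a pi with hpv
  set a1 := pswap a pi r with ha1
  have hg1 := fun x => pget_pswap a pi r x hpil hr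
  have hU1 : Untouched a a1 l r :=
    untouched_pswap a pi r l r h1 h2 (by omega) (le_refl r) hpil hr
  have hlen1 : a1.length = a.length := by simp [ha1]
  have hp := partLoop_spec pv (r - l) a1 l l l r (by omega) rfl (le_refl l) (le_refl l)
    (by omega) (by rw [hg1 r, if_pos rfl]) (by intro x hx1 hx2; omega)
    (by intro x hx1 hx2; omega)
  set sa := partLoop pv a1 l l r with hsa
  obtain ⟨hq1, hq2, hUq, hqr, hqlt, hqge⟩ := hp
  have hlen2 : sa.2.length = a.length := by rw [hUq.1, hlen1]
  have hstl : sa.1 < a.length := by omega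
  have hg2 := fun x => pget_pswap sa.2 r sa.1 x (by omega) (by omega)
  refine ⟨hq1, hq2, ?_, ?_, ?_, ?_⟩
  · exact untouched_trans (untouched_trans hU1 hUq)
      (untouched_pswap sa.2 r sa.1 l r (by omega) (le_refl r) hq1 hq2 (by omega) (by omega))
  · rw [hg2 sa.1, if_pos rfl]; exact hqr
  · intro x hx1 hx2
    rw [hg2 x, if_neg (by omega), if_neg (by omega)]
    exact hqlt x hx1 hx2
  · intro x hx1 hx2
    rw [hg2 x, if_neg (by omega)]
    by_cases hxr : x = r
    · rw [if_pos hxr]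
      exact hqge sa.1 (le_refl _) (by omega)
    · rw [if_neg hxr]
      exact hqge x (by omega) (by omega)

lemma length_sweepStep (l r : Nat) (a : List Int) (i : Nat) :
    (sweepStep l r a i).length = a.length := by
  simp [sweepStep]

lemma sweep_untouched (l r : Nat) :
    ∀ (idxs : List Nat) (a : List Int), (∀ i ∈ idxs, l ≤ i ∧ i ≤ r) → r < a.length →
    Untouched a (idxs.foldl (sweepStep l r) a) l r := by
  intro idxs
  induction idxs with
  | nil => intro a _ _; exact untouched_refl a l r
  | cons i idxs ih =>
    intro a hmem hr
    have hi := hmem i (List.mem_cons_self)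
    have hstep : Untouched a (sweepStep l r a i) l r := by
      have hsr : i ≤ min (i+4) r := by omega
      have hm := med5_range a i (min (i+4) r) hsr
      have hsw : l + (i - l) / 5 ≤ r := by omega
      exact untouched_pswap a _ _ l r (by omega) (by omega) (by omega) hsw
        (by omega) (by omega)
    rw [List.foldl_cons]
    exact untouched_trans hstep
      (ih (sweepStep l r a i) (fun x hx => hmem x (List.mem_cons_of_mem i hx))
        (by rw [length_sweepStep]; exact hr))

-- the joint correctness + fuel-sufficiency statement for select and pivot
def SelOK (f : Nat) : Prop := ∀ (a : List Int) (l r k : Nat), l ≤ k → k ≤ r → r < a.length →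
  2*(r-l)+2 ≤ f →
  ∃ b, selectF f a l r k = some (k, b) ∧ Untouched a b l r ∧
    pget b k = (sortI (pseg a l (r+1-l))).getD (k-l) 0

def PivOK (f : Nat) : Prop := ∀ (a : List Int) (l r : Nat), l ≤ r → r < a.length →
  2*(r-l)+1 ≤ f →
  ∃ p b, pivotF f a l r = some (p, b) ∧ l ≤ p ∧ p ≤ r ∧ Untouched a b l r

lemma selectF_pivotF_ok : ∀ f, SelOK f ∧ PivOK f := by
  intro f
  induction f with
  | zero => exact ⟨fun a l r k _ _ _ hf => by omega, fun a l r _ _ hf => by omega⟩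
  | succ f ih =>
    obtain ⟨ihS, ihP⟩ := ih
    constructor
    · -- SelOK (f+1)
      intro a l r k hlk hkr hr hf
      rw [selectF]
      by_cases hlr : l = r
      · subst hlr
        have hkl : k = l := by omega
        subst hkl
        rw [if_pos rfl]
        refine ⟨a, rfl, untouched_refl a k k, ?_⟩
        have : k + 1 - k = 1 := by omega
        rw [this, pseg_one, sortI_singleton]
        simp
      · rw [if_neg hlr]
        obtain ⟨pi, a1, hpiv, hpi1, hpi2, hU1⟩ :=
          ihP a l r (by omega) hr (by omega)
        rw [hpiv]
        dsimp only
        have hr1 : r < a1.length := by rw [hU1.1]; exact hr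
        obtain ⟨hp1, hp2, hU2, hpvp, hlt, hge⟩ :=
          partitionA_spec a1 l r pi hpi1 hpi2 hr1
        set p := (partitionA a1 l r pi).1 with hp
        set a2 := (partitionA a1 l r pi).2 with ha2
        set pv := pget a1 pi with hpvdef
        have hUa2 : Untouched a a2 l r := untouched_trans hU1 hU2
        have hr2 : r < a2.length := by rw [hUa2.1]; exact hr
        -- split of the segment of a2 at p
        have hplen : r + 1 - l = (p - l) + (1 + (r - p)) := by omega
        have hlp : l + (p - l) = p := by omega
        have hsplit : pseg a2 l (r+1-l) =
            pseg a2 l (p-l) ++ pget a2 p :: pseg a2 (p+1) (r-p) := by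
          rw [hplen, pseg_append, pseg_append, hlp, pseg_one]
          simp
        have hLlt : ∀ x ∈ pseg a2 l (p-l), x < pv := by
          intro x hx
          obtain ⟨i0, hi1, hi2, hi3⟩ := mem_pseg.mp hx
          rw [hi3]; exact hlt i0 hi1 (by omega)
        have hUge : ∀ x ∈ pseg a2 (p+1) (r-p), pv ≤ x := by
          intro x hx
          obtain ⟨i0, hi1, hi2, hi3⟩ := mem_pseg.mp hx
          rw [hi3]; exact hge i0 (by omega) (by omega)
        have hsega : (pseg a l (r+1-l)).Perm (pseg a2 l (r+1-l)) :=
          (pseg_perm_of_untouched hUa2 hr (by omega)).symm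
        have hsort : sortI (pseg a l (r+1-l)) =
            sortI (pseg a2 l (p-l)) ++ pv :: sortI (pseg a2 (p+1) (r-p)) := by
          rw [sortI_congr_perm hsega, hsplit, hpvp]
          exact sortI_split _ _ _ hLlt (by rw [← hpvp] at hUge ⊢; exact hUge)
        have hLlen : (sortI (pseg a2 l (p-l))).length = p - l := by
          rw [length_sortI, length_pseg]
        by_cases hkp : k = p
        · rw [if_pos hkp]
          refine ⟨a2, rfl, hUa2, ?_⟩
          rw [hsort, List.getD_append_right _ _ _ _ (by omega)]
          subst hkp
          rw [hLlen]
          simp [hpvp]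
        · rw [if_neg hkp]
          by_cases hklt : k < p
          · rw [if_pos hklt]
            obtain ⟨b, hsel, hU3, hval⟩ := ihS a2 l (p-1) k hlk (by omega)
              (by omega) (by omega)
            rw [hsel]
            refine ⟨b, rfl, untouched_trans hUa2 (untouched_mono (le_refl l) (by omega) hU3), ?_⟩
            rw [hval, hsort, List.getD_append _ _ _ _ (by omega)]
            have : p - 1 + 1 - l = p - l := by omega
            rw [this]
          · rw [if_neg hklt]
            obtain ⟨b, hsel, hU3, hval⟩ := ihS a2 (p+1) r k (by omega) hkr
              hr2 (by omega)
            rw [hsel]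
            refine ⟨b, rfl, untouched_trans hUa2 (untouched_mono (by omega) (le_refl r) hU3), ?_⟩
            rw [hval, hsort, List.getD_append_right _ _ _ _ (by omega), hLlen]
            have e1 : k - l - (p - l) = (k - (p+1)) + 1 := by omega
            rw [e1]
            simp
    · -- PivOK (f+1)
      intro a l r hlr hr hf
      rw [pivotF]
      by_cases h5 : r - l < 5
      · rw [if_pos h5]
        have := med5_range a l r hlr
        exact ⟨med5 a l r, a, rfl, this.1, this.2, untouched_refl a l r⟩
      · rw [if_neg h5]
        have hmem : ∀ i ∈ List.range' l ((r - l) / 5 + 1) 5, l ≤ i ∧ i ≤ r := by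
          intro i hi
          rw [List.mem_range'] at hi
          obtain ⟨j, hj1, hj2⟩ := hi
          omega
        have hUsw := sweep_untouched l r (List.range' l ((r - l) / 5 + 1) 5) a hmem hr
        set a3 := (List.range' l ((r - l) / 5 + 1) 5).foldl (sweepStep l r) a with ha3
        have hr3 : l + ((r-l)/5 + 1) - 1 < a3.length := by
          rw [hUsw.1]; omega
        obtain ⟨b, hsel, hU, _⟩ := ihS a3 l (l + ((r-l)/5 + 1) - 1) (l + ((r-l)/5 + 1) / 2)
          (by omega) (by omega) hr3 (by omega)
        rw [hsel]
        exact ⟨_, b, rfl, by omega, by omega,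
          untouched_trans hUsw (untouched_mono (le_refl l) (by omega) hU)⟩

lemma loop2_eq (mv : Int) : ∀ (xs : List Int) (i : Nat),
    loop2 xs mv i = (PySem.List.index? xs mv).map (fun j => i + j) := by
  intro xs
  induction xs with
  | nil => intro i; simp [loop2, PySem.List.index?_eq_idxOf?]
  | cons x xs ih =>
    intro i
    rw [loop2]
    by_cases h : x = mv
    · rw [if_pos h, h, PySem.List.index?_cons_self]; simp
    · rw [if_neg h, ih (i+1), PySem.List.index?_cons_of_ne xs h]
      cases PySem.List.index? xs mv with
      | none => simp
      | some j => simp; omega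

lemma loop1_pos (mv : Int) : ∀ (xs : List Int) (less eq : Int) (i : Nat), 0 < eq →
    loop1 xs mv less eq i = none := by
  intro xs
  induction xs with
  | nil => intros; simp [loop1]
  | cons x xs ih =>
    intro less eq i h
    rw [loop1]
    by_cases h1 : x = mv
    · rw [if_pos h1, if_neg (by rintro ⟨h2, _⟩; omega)]
      exact ih _ _ _ (by split_ifs <;> omega)
    · rw [if_neg h1]
      exact ih _ _ _ h

lemma loop1_main (mv : Int) : ∀ (xs : List Int) (less : Int) (i : Nat),
    loop1 xs mv less 0 i =
      if less = 0 then (PySem.List.index? xs mv).map (fun j => i + j) else none := by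
  intro xs
  induction xs with
  | nil => intros; simp [loop1, PySem.List.index?_eq_idxOf?]
  | cons x xs ih =>
    intro less i
    rw [loop1]
    by_cases h : x = mv
    · rw [h, PySem.List.index?_cons_self, if_pos rfl]
      by_cases hl : less = 0
      · rw [if_pos (by exact ⟨rfl, hl⟩), if_pos hl]; simp
      · rw [if_neg (by rintro ⟨_, hc⟩; exact hl hc), if_neg (lt_irrefl mv),
          if_neg (lt_irrefl mv), if_pos rfl, if_neg hl,
          loop1_pos mv xs _ _ _ (by omega)]
    · rw [if_neg h, ih less (i+1), PySem.List.index?_cons_of_ne xs h]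
      by_cases hl : less = 0
      · rw [if_pos hl, if_pos hl]
        cases PySem.List.index? xs mv with
        | none => simp
        | some j => simp; omega
      · rw [if_neg hl, if_neg hl]

-- ===== VERDICT (by name: the statement is the Claim_ definition above) =====
theorem MoM7Pos_spec : Claim_equal_MoM7Pos := by
  intro arr _
  unfold Spec_MoM7Pos
  by_cases h : arr = []
  · simp [MoM7Pos, MoM7Pos_alt, h]
  · have hn : 0 < arr.length := List.length_pos_iff.mpr h
    obtain ⟨b, hsel, hU, hval⟩ := (selectF_pivotF_ok (2*arr.length+2)).1 arr 0
      (arr.length-1) (arr.length/2) (Nat.zero_le _) (by omega) (by omega) (by omega)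
    simp only [MoM7Pos, MoM7Pos_alt, if_neg h]
    rw [hsel]
    dsimp only
    rw [show arr.length - 1 + 1 - 0 = arr.length from by omega, pseg_full,
      Nat.sub_zero] at hval
    have hblen : b.length = arr.length := hU.1
    have hmem : pget b (arr.length/2) ∈ arr := by
      have hlt : arr.length/2 < b.length := by omega
      have : pget b (arr.length/2) = b[arr.length/2] := List.getD_eq_getElem b 0 hlt
      rw [this]
      exact (hU.2.2.mem_iff).mp (List.getElem_mem hlt)
    obtain ⟨jj, hj⟩ := Option.isSome_iff_exists.mp
      ((PySem.List.index?_isSome_iff arr (pget b (arr.length/2))).mpr hmem)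
    rw [sortI] at hval
    rw [← hval, hj]
    by_cases hl : ((arr.filter (fun x => x < pget b (arr.length/2))).length : Int) = 0
    · rw [loop1_main (pget b (arr.length/2)) arr _ 0, if_pos hl, hj]
      simp
    · rw [loop1_main (pget b (arr.length/2)) arr _ 0, if_neg hl]
      dsimp only
      rw [loop2_eq (pget b (arr.length/2)) arr 0, hj]
      simp
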